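-- pv_equiv track=rewrite | github.com/Engineernoob/commit-message-generator | git-commit/backend/dungeon.py | _pillar_room
-- ===== SOURCE A (Python) =====
-- from typing import Dict, List, Tuple
--
-- def _rect_room(W: int, H: int) -> List[str]:
--     lines = ["+" + "-" * (W - 2) + "+"]
--     for _ in range(H - 2):
--         lines.append("|" + " " * (W - 2) + "|")
--     lines.append("+" + "-" * (W - 2) + "+")
--     return lines
--
-- def _pillar_room(W: int, H: int) -> List[str]:
--     lines = _rect_room(W, H)
--     for r in [H // 3, H * 2 // 3]:
--         if 1 <= r <= H - 2:
--             row = list(lines[r])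
--             for c in [W // 4, W * 3 // 4]:
--                 if 1 <= c <= W - 2:
--                     row[c] = "O"
--             lines[r] = "".join(row)
--     return lines
-- ===== SOURCE B (Python) =====
-- def _pillar_room(W: int, H: int) -> list:
--     pillar_rows = [r for r in (H // 3, H * 2 // 3) if 1 <= r <= H - 2]
--     pillar_cols = [c for c in (W // 4, W * 3 // 4) if 1 <= c <= W - 2]
--     border = "+" + "-" * (W - 2) + "+"
--     blank = "|" + " " * (W - 2) + "|"
--     pillar = "|" + "".join(
--         "O" if c in pillar_cols else " " for c in range(1, W - 1)
--     ) + "|"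
--     return [border] + [pillar if i in pillar_rows else blank
--                        for i in range(1, H - 1)] + [border]
-- ===== Notes on version B (the rewrite author's own statement) =====
-- stated objective: simpler
-- what changed: B precomputes the admissible pillar row/column index lists and emits every output line positionally in one pass (border, computed middle rows, border), instead of building a blank rectangle first and then mutating selected rows in place character by character.
import Mathlib
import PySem

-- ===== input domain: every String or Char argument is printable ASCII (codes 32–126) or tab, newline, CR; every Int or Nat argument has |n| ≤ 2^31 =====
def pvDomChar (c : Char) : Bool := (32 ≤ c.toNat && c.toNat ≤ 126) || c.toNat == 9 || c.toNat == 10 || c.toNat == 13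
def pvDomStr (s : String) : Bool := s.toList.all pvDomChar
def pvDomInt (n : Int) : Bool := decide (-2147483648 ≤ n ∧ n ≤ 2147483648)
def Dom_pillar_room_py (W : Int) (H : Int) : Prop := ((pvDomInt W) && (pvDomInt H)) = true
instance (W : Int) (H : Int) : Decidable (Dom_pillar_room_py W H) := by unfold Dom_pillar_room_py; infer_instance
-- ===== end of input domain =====

-- B precomputes the pillar row/column index lists and emits each output line positionally in
-- one pass, instead of A's build-blank-rectangle-then-mutate-rows; objective: simpler (no speed claim).
-- Strings are handled as List Char (PySem convention) and assembled with String.ofList at the end;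
-- Python's list(lines[r]) / "".join(row) are identities on that representation.

-- ===== PORT A =====
-- _rect_room
def pvRectRoom (W : Int) (H : Int) : List (List Char) :=
  let lines : List (List Char) := [['+'] ++ PySem.List.pyRepeat ['-'] (W - 2) ++ ['+']]
  let lines := (PySem.List.pyRange 0 (H - 2) 1).foldl
      (fun acc _ => acc ++ [['|'] ++ PySem.List.pyRepeat [' '] (W - 2) ++ ['|']]) lines
  lines ++ [['+'] ++ PySem.List.pyRepeat ['-'] (W - 2) ++ ['+']]

def pillar_room_py (W : Int) (H : Int) : List String :=
  let lines := pvRectRoom W H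
  let lines := [PySem.Int.floordiv H 3, PySem.Int.floordiv (H * 2) 3].foldl
      (fun ls r =>
        if 1 ≤ r ∧ r ≤ H - 2 then
          let row := PySem.List.pyGetD ls r []
          let row := [PySem.Int.floordiv W 4, PySem.Int.floordiv (W * 3) 4].foldl
              (fun rw c => if 1 ≤ c ∧ c ≤ W - 2 then PySem.List.pySetD rw c 'O' else rw) row
          PySem.List.pySetD ls r row
        else ls) lines
  lines.map String.ofList

-- ===== PORT B =====
def pillar_room_py_alt (W : Int) (H : Int) : List String :=
  let pillarRows := [PySem.Int.floordiv H 3, PySem.Int.floordiv (H * 2) 3].filter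
      (fun r => decide (1 ≤ r ∧ r ≤ H - 2))
  let pillarCols := [PySem.Int.floordiv W 4, PySem.Int.floordiv (W * 3) 4].filter
      (fun c => decide (1 ≤ c ∧ c ≤ W - 2))
  let border := ['+'] ++ PySem.List.pyRepeat ['-'] (W - 2) ++ ['+']
  let blank := ['|'] ++ PySem.List.pyRepeat [' '] (W - 2) ++ ['|']
  let pillar := ['|'] ++ (PySem.List.pyRange 1 (W - 1) 1).map
      (fun c => if c ∈ pillarCols then 'O' else ' ') ++ ['|']
  (([border] ++ (PySem.List.pyRange 1 (H - 1) 1).map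
      (fun i => if i ∈ pillarRows then pillar else blank)) ++ [border]).map String.ofList

-- ===== PRECONDITION & SPEC =====
def Spec_pillar_room_py (W : Int) (H : Int) (out : List String) : Prop := out = pillar_room_py_alt W H
instance (W : Int) (H : Int) (out : List String) : Decidable (Spec_pillar_room_py W H out) := by unfold Spec_pillar_room_py; infer_instance

-- ===== CLAIM (what is proved, stated in full; the proofs are below) =====
def Claim_equal_pillar_room_py : Prop := ∀ (W : Int) (H : Int), Dom_pillar_room_py W H → Spec_pillar_room_py W H (pillar_room_py W H)

-- ===== LEMMAS AND PROOFS =====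

theorem set_map_range {α : Type} (m : Nat) (f : Nat → α) (j0 : Nat) (v : α) :
    ((List.range m).map f).set j0 v = (List.range m).map (fun j => if j = j0 then v else f j) := by
  apply List.ext_getElem
  · simp
  · intro i h1 h2
    rw [List.getElem_set]
    simp only [List.getElem_map, List.getElem_range]
    by_cases h : j0 = i
    · simp [h]
    · simp [h, Ne.symm h]

theorem pvGetCanon {α : Type} (b e d : α) (g : Nat → α) (m : Nat) (r : Int)
    (h1 : 1 ≤ r) (h2 : r ≤ (m : Int)) :
    PySem.List.pyGetD (b :: ((List.range m).map g ++ [e])) r d = g (r.toNat - 1) := by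
  rw [PySem.List.pyGetD_eq_getElem _ d (by omega) (by simp; omega)]
  have hne : r.toNat ≠ 0 := by omega
  simp only [List.getElem_cons, hne, dite_false]
  rw [List.getElem_append_left (by simp; omega)]
  simp

theorem pvSetCanon {α : Type} (b e v : α) (g : Nat → α) (m : Nat) (r : Int)
    (h1 : 1 ≤ r) (h2 : r ≤ (m : Int)) :
    PySem.List.pySetD (b :: ((List.range m).map g ++ [e])) r v
      = b :: ((List.range m).map (fun j => if j = r.toNat - 1 then v else g j) ++ [e]) := by
  rw [PySem.List.pySetD_of_nonneg _ v (by omega)]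
  have hr : r.toNat = (r.toNat - 1) + 1 := by omega
  rw [hr, List.set_cons_succ, List.set_append_left _ _ (by simp; omega), set_map_range]
  have h3 : r.toNat - 1 + 1 - 1 = r.toNat - 1 := by omega
  rw [h3]

def pvBord (W : Int) : List Char := '+' :: (List.replicate (W - 2).toNat '-' ++ ['+'])
def pvMid0 (W : Int) : List Char := '|' :: (List.replicate (W - 2).toNat ' ' ++ ['|'])
def pvRowP (H : Int) (r : Int) : Bool :=
  decide (((r = PySem.Int.floordiv H 3 ∨ r = PySem.Int.floordiv (H * 2) 3) ∧ 1 ≤ r ∧ r ≤ H - 2))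
def pvColP (W : Int) (c : Int) : Bool :=
  decide (((c = PySem.Int.floordiv W 4 ∨ c = PySem.Int.floordiv (W * 3) 4) ∧ 1 ≤ c ∧ c ≤ W - 2))
def pvMidRow (W : Int) (H : Int) (i : Int) : List Char :=
  '|' :: ((List.range (W - 2).toNat).map
      (fun (k : Nat) => if pvRowP H i && pvColP W (1 + (k : Int)) then 'O' else ' ') ++ ['|'])
def pvCanon (W : Int) (H : Int) : List (List Char) :=
  pvBord W :: ((List.range (H - 2).toNat).map (fun (j : Nat) => pvMidRow W H (1 + (j : Int))) ++ [pvBord W])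

def pvRowMod (W : Int) (row : List Char) : List Char :=
  [PySem.Int.floordiv W 4, PySem.Int.floordiv (W * 3) 4].foldl
      (fun rw c => if 1 ≤ c ∧ c ≤ W - 2 then PySem.List.pySetD rw c 'O' else rw) row

def pvStepFn (W : Int) (H : Int) (ls : List (List Char)) (r : Int) : List (List Char) :=
  if 1 ≤ r ∧ r ≤ H - 2 then
    PySem.List.pySetD ls r (pvRowMod W (PySem.List.pyGetD ls r []))
  else ls

theorem pvRect_eq (W H : Int) :
    pvRectRoom W H = pvBord W :: ((List.range (H - 2).toNat).map (fun _ => pvMid0 W) ++ [pvBord W]) := by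
  simp only [pvRectRoom]
  rw [PySem.List.foldl_append_singleton_eq_map (fun _ => ['|'] ++ PySem.List.pyRepeat [' '] (W - 2) ++ ['|'])]
  simp [List.map_const', PySem.List.length_pyRange_one, PySem.List.pyRepeat_singleton, pvBord, pvMid0]

theorem pvA_unfold (W H : Int) :
    pillar_room_py W H =
      (pvStepFn W H (pvStepFn W H (pvRectRoom W H) (PySem.Int.floordiv H 3))
        (PySem.Int.floordiv (H * 2) 3)).map String.ofList := by
  simp only [pillar_room_py, pvStepFn, pvRowMod, List.foldl_cons, List.foldl_nil]

theorem pvDistinct (H : Int) (h1 : 1 ≤ PySem.Int.floordiv H 3) :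
    PySem.Int.floordiv H 3 < PySem.Int.floordiv (H * 2) 3 := by
  have e1 : PySem.Int.floordiv H 3 = H / 3 := PySem.Int.floordiv_eq_ediv_of_pos (by norm_num)
  have e2 : PySem.Int.floordiv (H * 2) 3 = H * 2 / 3 := PySem.Int.floordiv_eq_ediv_of_pos (by norm_num)
  rw [e1] at h1
  rw [e1, e2]
  omega

theorem pvStep_canon (W H : Int) (f : Nat → List Char) (r : Int) :
    pvStepFn W H (pvBord W :: ((List.range (H - 2).toNat).map f ++ [pvBord W])) r
      = pvBord W :: ((List.range (H - 2).toNat).map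
          (fun (j : Nat) => if r = 1 + (j : Int) ∧ 1 ≤ r ∧ r ≤ H - 2 then pvRowMod W (f j) else f j)
          ++ [pvBord W]) := by
  unfold pvStepFn
  by_cases hg : 1 ≤ r ∧ r ≤ H - 2
  · rw [if_pos hg, pvGetCanon _ _ _ _ _ r hg.1 (by omega),
      pvSetCanon _ _ _ _ _ r hg.1 (by omega)]
    refine congrArg _ (congrArg₂ (fun (a b : List (List Char)) => a ++ b) ?_ rfl)
    apply List.map_congr_left
    intro j hj
    by_cases h : j = r.toNat - 1
    · rw [if_pos h, if_pos ⟨by omega, hg⟩, h]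
    · rw [if_neg h, if_neg (by intro hc; exact h (by omega))]
  · rw [if_neg hg]
    refine congrArg _ (congrArg₂ (fun (a b : List (List Char)) => a ++ b) ?_ rfl)
    apply List.map_congr_left
    intro j hj
    rw [if_neg (fun hc => hg hc.2)]

theorem pvMidRow_of_false (W H : Int) (i : Int) (hi : pvRowP H i = false) :
    pvMidRow W H i = pvMid0 W := by
  unfold pvMidRow pvMid0
  simp [hi, List.map_const']

theorem pvRowMod_mid0 (W H : Int) (i : Int) (hi : pvRowP H i = true) :
    pvRowMod W (pvMid0 W) = pvMidRow W H i := by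
  unfold pvRowMod pvMid0 pvMidRow
  simp only [List.foldl_cons, List.foldl_nil, hi, Bool.true_and]
  rw [show List.replicate (W - 2).toNat ' ' = (List.range (W - 2).toNat).map (fun _ => ' ') from
    by simp [List.map_const']]
  by_cases g1 : 1 ≤ PySem.Int.floordiv W 4 ∧ PySem.Int.floordiv W 4 ≤ W - 2
  · rw [if_pos g1, pvSetCanon _ _ _ _ _ _ g1.1 (by omega)]
    by_cases g2 : 1 ≤ PySem.Int.floordiv (W * 3) 4 ∧ PySem.Int.floordiv (W * 3) 4 ≤ W - 2
    · rw [if_pos g2, pvSetCanon _ _ _ _ _ _ g2.1 (by omega)]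
      refine congrArg _ (congrArg₂ (fun (a b : List Char) => a ++ b) ?_ rfl)
      apply List.map_congr_left
      intro j hj
      rw [List.mem_range] at hj
      simp only [pvColP, decide_eq_true_eq]
      split_ifs <;> first | rfl | omega
    · rw [if_neg g2]
      refine congrArg _ (congrArg₂ (fun (a b : List Char) => a ++ b) ?_ rfl)
      apply List.map_congr_left
      intro j hj
      rw [List.mem_range] at hj
      simp only [pvColP, decide_eq_true_eq]
      split_ifs <;> first | rfl | omega
  · rw [if_neg g1]
    by_cases g2 : 1 ≤ PySem.Int.floordiv (W * 3) 4 ∧ PySem.Int.floordiv (W * 3) 4 ≤ W - 2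
    · rw [if_pos g2, pvSetCanon _ _ _ _ _ _ g2.1 (by omega)]
      refine congrArg _ (congrArg₂ (fun (a b : List Char) => a ++ b) ?_ rfl)
      apply List.map_congr_left
      intro j hj
      rw [List.mem_range] at hj
      simp only [pvColP, decide_eq_true_eq]
      split_ifs <;> first | rfl | omega
    · rw [if_neg g2]
      refine congrArg _ (congrArg₂ (fun (a b : List Char) => a ++ b) ?_ rfl)
      apply List.map_congr_left
      intro j hj
      rw [List.mem_range] at hj
      simp only [pvColP, decide_eq_true_eq]
      split_ifs <;> first | rfl | omega

theorem pvA_eq_canon (W H : Int) :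
    pillar_room_py W H = (pvCanon W H).map String.ofList := by
  rw [pvA_unfold, pvRect_eq, pvStep_canon, pvStep_canon]
  unfold pvCanon
  refine congrArg _ ?_
  refine List.cons_eq_cons.mpr ⟨rfl, ?_⟩
  refine congrArg₂ (fun (a b : List (List Char)) => a ++ b) ?_ rfl
  apply List.map_congr_left
  intro j hj
  rw [List.mem_range] at hj
  by_cases hp : pvRowP H (1 + (j : Int)) = true
  · have hp' := hp
    simp only [pvRowP, decide_eq_true_eq] at hp'
    obtain ⟨hor, hb1, hb2⟩ := hp'
    rcases hor with h1 | h2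
    · have hC2 : ¬(PySem.Int.floordiv (H * 2) 3 = 1 + (j : Int) ∧
          1 ≤ PySem.Int.floordiv (H * 2) 3 ∧ PySem.Int.floordiv (H * 2) 3 ≤ H - 2) := by
        intro hc
        have := pvDistinct H (by omega)
        omega
      rw [if_neg hC2, if_pos ⟨h1.symm, by omega, by omega⟩, pvRowMod_mid0 W H _ hp]
    · have hC1 : ¬(PySem.Int.floordiv H 3 = 1 + (j : Int) ∧
          1 ≤ PySem.Int.floordiv H 3 ∧ PySem.Int.floordiv H 3 ≤ H - 2) := by
        intro hc
        have := pvDistinct H hc.2.1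
        omega
      rw [if_neg hC1, if_pos ⟨h2.symm, by omega, by omega⟩, pvRowMod_mid0 W H _ hp]
  · have hp' : pvRowP H (1 + (j : Int)) = false := by
      cases hq : pvRowP H (1 + (j : Int)) with
      | false => rfl
      | true => exact absurd hq hp
    have hC1 : ¬(PySem.Int.floordiv H 3 = 1 + (j : Int) ∧
        1 ≤ PySem.Int.floordiv H 3 ∧ PySem.Int.floordiv H 3 ≤ H - 2) := by
      intro hc
      simp only [pvRowP, decide_eq_false_iff_not] at hp'
      exact hp' ⟨Or.inl hc.1.symm, by omega, by omega⟩
    have hC2 : ¬(PySem.Int.floordiv (H * 2) 3 = 1 + (j : Int) ∧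
        1 ≤ PySem.Int.floordiv (H * 2) 3 ∧ PySem.Int.floordiv (H * 2) 3 ≤ H - 2) := by
      intro hc
      simp only [pvRowP, decide_eq_false_iff_not] at hp'
      exact hp' ⟨Or.inr hc.1.symm, by omega, by omega⟩
    rw [if_neg hC2, if_neg hC1, pvMidRow_of_false W H _ hp']

theorem pvB_eq_canon (W H : Int) :
    pillar_room_py_alt W H = (pvCanon W H).map String.ofList := by
  unfold pillar_room_py_alt pvCanon
  have h1 : H - 1 - 1 = H - 2 := by ring
  have h2 : W - 1 - 1 = W - 2 := by ring
  simp only [PySem.List.pyRange_one, PySem.List.pyRepeat_singleton, h1, h2, List.map_map,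
    List.map_cons, List.map_append, List.map_nil, List.cons_append, List.nil_append]
  refine List.cons_eq_cons.mpr ⟨by simp [pvBord], ?_⟩
  refine congrArg₂ _ ?_ (by simp [pvBord])
  apply List.map_congr_left
  intro j hj
  simp only [Function.comp, List.mem_filter, List.mem_cons, List.not_mem_nil, or_false,
    decide_eq_true_eq]
  by_cases hp : pvRowP H (1 + (j : Int)) = true
  · rw [if_pos (by simpa [pvRowP, decide_eq_true_eq] using hp)]
    rw [← pvRowMod_mid0 W H _ hp]
    unfold pvRowMod pvMid0
    simp only [List.foldl_cons, List.foldl_nil]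
    rw [show List.replicate (W - 2).toNat ' ' = (List.range (W - 2).toNat).map (fun _ => ' ') from
      by simp [List.map_const']]
    by_cases g1 : 1 ≤ PySem.Int.floordiv W 4 ∧ PySem.Int.floordiv W 4 ≤ W - 2
    · rw [if_pos g1, pvSetCanon _ _ _ _ _ _ g1.1 (by omega)]
      by_cases g2 : 1 ≤ PySem.Int.floordiv (W * 3) 4 ∧ PySem.Int.floordiv (W * 3) 4 ≤ W - 2
      · rw [if_pos g2, pvSetCanon _ _ _ _ _ _ g2.1 (by omega)]
        refine congrArg (fun t : List Char => String.ofList ('|' :: (t ++ ['|']))) ?_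
        apply List.map_congr_left
        intro k hk
        rw [List.mem_range] at hk
        simp only [Function.comp]
        split_ifs <;> first | rfl | omega
      · rw [if_neg g2]
        refine congrArg (fun t : List Char => String.ofList ('|' :: (t ++ ['|']))) ?_
        apply List.map_congr_left
        intro k hk
        rw [List.mem_range] at hk
        simp only [Function.comp]
        split_ifs <;> first | rfl | omega
    · rw [if_neg g1]
      by_cases g2 : 1 ≤ PySem.Int.floordiv (W * 3) 4 ∧ PySem.Int.floordiv (W * 3) 4 ≤ W - 2
      · rw [if_pos g2, pvSetCanon _ _ _ _ _ _ g2.1 (by omega)]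
        refine congrArg (fun t : List Char => String.ofList ('|' :: (t ++ ['|']))) ?_
        apply List.map_congr_left
        intro k hk
        rw [List.mem_range] at hk
        simp only [Function.comp]
        split_ifs <;> first | rfl | omega
      · rw [if_neg g2]
        refine congrArg (fun t : List Char => String.ofList ('|' :: (t ++ ['|']))) ?_
        apply List.map_congr_left
        intro k hk
        rw [List.mem_range] at hk
        simp only [Function.comp]
        split_ifs <;> first | rfl | omega
  · have hp' : pvRowP H (1 + (j : Int)) = false := by
      cases hq : pvRowP H (1 + (j : Int)) with
      | false => rfl
      | true => exact absurd hq hp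
    rw [if_neg (by simpa [pvRowP, decide_eq_true_eq] using hp), pvMidRow_of_false W H _ hp']
    rfl

-- ===== VERDICT (by name: the statement is the Claim_ definition above) =====
theorem pillar_room_py_spec : Claim_equal_pillar_room_py := by
  intro W H _
  unfold Spec_pillar_room_py
  rw [pvA_eq_canon, pvB_eq_canon]
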